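-- pv_equiv track=rewrite | github.com/antlr/grammars-v4 | sync_pldb.py | _merge_duplicate_reference_sections
-- ===== SOURCE A (Python) =====
-- def _is_reference_heading(line):
--     return line.strip() == "## Reference"
--
-- def _is_any_heading(line):
--     return line.strip().startswith("#")
--
-- def _merge_duplicate_reference_sections(lines):
--     ref_positions = [i for i, line in enumerate(lines) if _is_reference_heading(line)]
--     if len(ref_positions) <= 1:
--         return lines, []
--     first_ref = ref_positions[0]
--     extra_content = []
--     sections_to_remove = []
--     for ref_pos in ref_positions[1:]:
--         ref_end = _find_section_end(lines, ref_pos)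
--         for i in range(ref_pos + 1, ref_end):
--             if lines[i].strip():
--                 extra_content.append(lines[i])
--         sections_to_remove.append((ref_pos, ref_end))
--     new_lines = list(lines)
--     for start, end in reversed(sections_to_remove):
--         del new_lines[start:end]
--     if extra_content:
--         new_first_end = _find_section_end(new_lines, first_ref)
--         for i, cl in enumerate(extra_content):
--             new_lines.insert(new_first_end + i, cl)
--     return new_lines, ["merged duplicate Reference sections"]
--
-- def _find_section_end(lines, heading_idx):
--     for i in range(heading_idx + 1, len(lines)):
--         if _is_any_heading(lines[i]):
--             return i
--     return len(lines)
-- ===== SOURCE B (Python) =====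
-- def _merge_duplicate_reference_sections(lines):
--     # One pass splits lines into preamble + (heading, body...) sections;
--     # duplicate Reference sections are dropped, their non-blank body lines
--     # appended to the first Reference section; then flatten back.
--     preamble = []
--     sections = []
--     cur = None
--     for line in lines:
--         if line.strip().startswith("#"):
--             if cur is not None:
--                 sections.append(cur)
--             cur = [line]
--         elif cur is None:
--             preamble.append(line)
--         else:
--             cur.append(line)
--     if cur is not None:
--         sections.append(cur)
--     refs = [s for s in sections if s[0].strip() == "## Reference"]
--     if len(refs) <= 1:
--         return lines, []
--     extra = [l for s in refs[1:] for l in s[1:] if l.strip()]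
--     merged = list(preamble)
--     seen = False
--     for s in sections:
--         if s[0].strip() == "## Reference":
--             if not seen:
--                 merged.extend(s)
--                 merged.extend(extra)
--                 seen = True
--         else:
--             merged.extend(s)
--     return merged, ["merged duplicate Reference sections"]
-- ===== Notes on version B (the rewrite author's own statement) =====
-- stated objective: alternative
-- what changed: B replaces A's index-based pipeline (enumerate positions, find section ends by index scan, delete slices in reverse, insert at computed offsets) by a single structural pass that splits the lines into a preamble plus heading-led sections, keeps the first Reference section with the duplicates' non-blank bodies appended, drops later Reference sections, and flattens back.
import Mathlib
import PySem

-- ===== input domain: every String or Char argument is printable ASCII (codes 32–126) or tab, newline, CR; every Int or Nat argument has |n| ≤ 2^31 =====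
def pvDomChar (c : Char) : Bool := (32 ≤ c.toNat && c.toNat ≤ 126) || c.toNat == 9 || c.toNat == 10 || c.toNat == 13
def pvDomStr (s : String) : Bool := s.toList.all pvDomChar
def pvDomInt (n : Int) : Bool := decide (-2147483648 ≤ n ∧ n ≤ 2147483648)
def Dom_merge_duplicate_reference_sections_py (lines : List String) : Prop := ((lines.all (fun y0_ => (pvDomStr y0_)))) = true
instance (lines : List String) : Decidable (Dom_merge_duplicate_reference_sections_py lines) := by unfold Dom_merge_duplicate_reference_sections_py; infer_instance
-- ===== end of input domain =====

-- B re-implements the merge by one pass splitting the lines into preamble + heading-led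
-- sections and flattening them back (objective: alternative decomposition, no index surgery).

-- ===== PORT A =====
def pvIsRef (l : String) : Bool := PySem.Str.strip l == "## Reference"
def pvIsHead (l : String) : Bool := PySem.Str.startswith (PySem.Str.strip l) "#"

-- for i in range(heading_idx+1, len(lines)): if heading: return i ; return len(lines)
def pvFindEnd (lines : List String) (idx : Nat) : Nat :=
  match (List.range' (idx+1) (lines.length - (idx+1))).find? (fun i => pvIsHead (lines.getD i "")) with
  | some i => i
  | none => lines.length

-- [i for i, line in enumerate(lines) if _is_reference_heading(line)]
def pvRefPos (lines : List String) : List Nat :=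
  (List.range lines.length).filter (fun i => pvIsRef (lines.getD i ""))

-- one iteration of A's loop over ref_positions[1:]
def pvCollectStep (lines : List String) (st : List String × List (Nat × Nat)) (rp : Nat) :
    List String × List (Nat × Nat) :=
  let ref_end := pvFindEnd lines rp
  let extra := (List.range' (rp+1) (ref_end - (rp+1))).foldl
      (fun acc i => if PySem.Str.strip (lines.getD i "") != "" then acc ++ [lines.getD i ""] else acc) st.1
  (extra, st.2 ++ [(rp, ref_end)])

-- del new_lines[start:end]
def pvDelRange (nl : List String) (p : Nat × Nat) : List String := nl.take p.1 ++ nl.drop p.2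

-- new_lines.insert(new_first_end + i, cl)
def pvInsertAt (nfe : Nat) (nl : List String) (p : String × Nat) : List String :=
  nl.take (nfe + p.2) ++ p.1 :: nl.drop (nfe + p.2)

def merge_duplicate_reference_sections_py (lines : List String) : List String × List String :=
  let ref_positions := pvRefPos lines
  if ref_positions.length ≤ 1 then (lines, [])
  else
    let first_ref := ref_positions.headD 0
    let st := ref_positions.tail.foldl (pvCollectStep lines) ([], [])
    let new_lines := st.2.reverse.foldl pvDelRange lines
    let new_lines2 :=
      if st.1.isEmpty then new_lines
      else
        let nfe := pvFindEnd new_lines first_ref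
        (st.1.zipIdx).foldl (pvInsertAt nfe) new_lines
    (new_lines2, ["merged duplicate Reference sections"])

-- ===== PORT B =====
def pvSplitStep (st : List String × List (List String) × Option (List String)) (line : String) :
    List String × List (List String) × Option (List String) :=
  if pvIsHead line then
    match st.2.2 with
    | some cur => (st.1, st.2.1 ++ [cur], some [line])
    | none => (st.1, st.2.1, some [line])
  else
    match st.2.2 with
    | none => (st.1 ++ [line], st.2.1, none)
    | some cur => (st.1, st.2.1, some (cur ++ [line]))

def pvFinish (st : List String × List (List String) × Option (List String)) :
    List String × List (List String) :=
  match st.2.2 with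
  | some cur => (st.1, st.2.1 ++ [cur])
  | none => (st.1, st.2.1)

def pvSplit (lines : List String) : List String × List (List String) :=
  pvFinish (lines.foldl pvSplitStep ([], [], none))

def pvMergeStep (extra : List String) (st : List String × Bool) (s : List String) :
    List String × Bool :=
  if pvIsRef (s.headD "") then
    (if st.2 then st else (st.1 ++ s ++ extra, true))
  else (st.1 ++ s, st.2)

def merge_duplicate_reference_sections_py_alt (lines : List String) : List String × List String :=
  let ps := pvSplit lines
  let refs := ps.2.filter (fun s => pvIsRef (s.headD ""))
  if refs.length ≤ 1 then (lines, [])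
  else
    let extra := (refs.tail.map (fun s => s.tail.filter (fun l => PySem.Str.strip l != ""))).flatten
    let merged := ps.2.foldl (pvMergeStep extra) (ps.1, false)
    (merged.1, ["merged duplicate Reference sections"])

-- ===== PRECONDITION & SPEC =====
def Spec_merge_duplicate_reference_sections_py (lines : List String) (out : List String × List String) : Prop := out = merge_duplicate_reference_sections_py_alt lines
instance (lines : List String) (out : List String × List String) : Decidable (Spec_merge_duplicate_reference_sections_py lines out) := by unfold Spec_merge_duplicate_reference_sections_py; infer_instance

-- ===== CLAIM (what is proved, stated in full; the proofs are below) =====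
def Claim_equal_merge_duplicate_reference_sections_py : Prop := ∀ (lines : List String), Dom_merge_duplicate_reference_sections_py lines → Spec_merge_duplicate_reference_sections_py lines (merge_duplicate_reference_sections_py lines)

-- ===== LEMMAS AND PROOFS =====

-- recursive characterisation of pvSplit (preamble, sections)
def pvRSplit : List String → List String × List (List String)
  | [] => ([], [])
  | l :: ls =>
    let p := pvRSplit ls
    if pvIsHead l then ([], (l :: p.1) :: p.2) else (l :: p.1, p.2)

def pvWfS (S : List (List String)) : Prop :=
  ∀ s ∈ S, ∃ h t, s = h :: t ∧ pvIsHead h = true ∧ ∀ l ∈ t, pvIsHead l = false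

-- offsets of the Reference-section headings, starting at offset m
def pvRefOffs (m : Nat) : List (List String) → List Nat
  | [] => []
  | s :: ss => (if pvIsRef (s.headD "") then [m] else []) ++ pvRefOffs (m + s.length) ss

-- offsets of duplicate (non-first) Reference sections
def pvDupOffs (m : Nat) (seen : Bool) : List (List String) → List Nat
  | [] => []
  | s :: ss => if pvIsRef (s.headD "") then
                 (if seen then [m] else []) ++ pvDupOffs (m + s.length) true ss
               else pvDupOffs (m + s.length) seen ss

-- the non-blank body lines of duplicate Reference sections
def pvExtraOf (seen : Bool) : List (List String) → List String
  | [] => []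
  | s :: ss => if pvIsRef (s.headD "") then
                 (if seen then s.tail.filter (fun l => PySem.Str.strip l != "") else []) ++ pvExtraOf true ss
               else pvExtraOf seen ss

-- the (start, end) ranges A deletes
def pvRemOf (m : Nat) (seen : Bool) : List (List String) → List (Nat × Nat)
  | [] => []
  | s :: ss => if pvIsRef (s.headD "") then
                 (if seen then [(m, m + s.length)] else []) ++ pvRemOf (m + s.length) true ss
               else pvRemOf (m + s.length) seen ss

-- the sections that survive deletion
def pvKeepOf (seen : Bool) : List (List String) → List (List String)
  | [] => []
  | s :: ss => if pvIsRef (s.headD "") then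
                 (if seen then [] else [s]) ++ pvKeepOf true ss
               else s :: pvKeepOf seen ss

-- the sections B emits (first Reference section gets extra appended)
def pvBAcc (extra : List String) (seen : Bool) : List (List String) → List (List String)
  | [] => []
  | s :: ss => if pvIsRef (s.headD "") then
                 (if seen then [] else [s ++ extra]) ++ pvBAcc extra true ss
               else s :: pvBAcc extra seen ss

theorem pvRef_imp_head (l : String) (h : pvIsRef l = true) : pvIsHead l = true := by
  unfold pvIsRef at h
  unfold pvIsHead
  rw [eq_of_beq h]
  decide

-- ---- pvSplit = pvRSplit ----
theorem pvFold_some (ls : List String) : ∀ (P : List String) (S : List (List String)) (C : List String),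
    pvFinish (ls.foldl pvSplitStep (P, S, some C)) = (P, S ++ ((C ++ (pvRSplit ls).1) :: (pvRSplit ls).2)) := by
  induction ls with
  | nil => intro P S C; simp [pvFinish, pvRSplit]
  | cons l ls ih =>
      intro P S C
      by_cases hl : pvIsHead l
      · simp [pvSplitStep, hl, ih, pvRSplit]
      · simp [pvSplitStep, hl, ih, pvRSplit]

theorem pvFold_none (ls : List String) : ∀ (P : List String) (S : List (List String)),
    pvFinish (ls.foldl pvSplitStep (P, S, none)) = (P ++ (pvRSplit ls).1, S ++ (pvRSplit ls).2) := by
  induction ls with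
  | nil => intro P S; simp [pvFinish, pvRSplit]
  | cons l ls ih =>
      intro P S
      by_cases hl : pvIsHead l
      · simp [pvSplitStep, hl, pvFold_some, pvRSplit]
      · simp [pvSplitStep, hl, ih, pvRSplit]

theorem pvSplit_eq (lines : List String) : pvSplit lines = pvRSplit lines := by
  unfold pvSplit
  rw [pvFold_none]
  simp

theorem pvRSplit_flatten (lines : List String) :
    (pvRSplit lines).1 ++ (pvRSplit lines).2.flatten = lines := by
  induction lines with
  | nil => simp [pvRSplit]
  | cons l ls ih =>
      by_cases hl : pvIsHead l
      · simp [pvRSplit, hl, ih]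
      · simp [pvRSplit, hl, ih]

theorem pvRSplit_pre (lines : List String) :
    ∀ l ∈ (pvRSplit lines).1, pvIsHead l = false := by
  induction lines with
  | nil => simp [pvRSplit]
  | cons l ls ih =>
      by_cases hl : pvIsHead l
      · simp [pvRSplit, hl]
      · simp only [pvRSplit, hl]
        intro x hx
        simp at hx
        rcases hx with rfl | hx
        · simpa using hl
        · exact ih x hx

theorem pvRSplit_wf (lines : List String) : pvWfS (pvRSplit lines).2 := by
  induction lines with
  | nil => intro s hs; simp [pvRSplit] at hs
  | cons l ls ih =>
      by_cases hl : pvIsHead l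
      · intro s hs
        simp only [pvRSplit, hl, if_pos] at hs
        simp at hs
        rcases hs with rfl | hs
        · exact ⟨l, (pvRSplit ls).1, rfl, hl, pvRSplit_pre ls⟩
        · exact ih s hs
      · intro s hs
        simp only [pvRSplit, hl] at hs
        simp at hs
        exact ih s hs

-- ---- pvRefPos ----
theorem pvRefPos_cons (x : String) (xs : List String) :
    pvRefPos (x :: xs) = (if pvIsRef x then [0] else []) ++ (pvRefPos xs).map (· + 1) := by
  unfold pvRefPos
  rw [List.length_cons, List.range_succ_eq_map, List.filter_cons, List.filter_map]
  by_cases hx : pvIsRef x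
  · simp [hx, Function.comp_def, Nat.succ_eq_add_one]
  · simp [hx, Function.comp_def, Nat.succ_eq_add_one]

theorem pvRefPos_append (xs ys : List String) :
    pvRefPos (xs ++ ys) = pvRefPos xs ++ (pvRefPos ys).map (· + xs.length) := by
  induction xs with
  | nil => simp [pvRefPos]
  | cons x xs ih =>
      rw [List.cons_append, pvRefPos_cons, pvRefPos_cons, ih]
      simp [List.map_map, Function.comp_def, Nat.add_assoc, List.append_assoc]

theorem pvRefPos_nohead (xs : List String) (h : ∀ l ∈ xs, pvIsHead l = false) :
    pvRefPos xs = [] := by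
  unfold pvRefPos
  rw [List.filter_eq_nil_iff]
  intro i hi
  rw [List.mem_range] at hi
  rw [List.getD_eq_getElem _ _ hi]
  intro href
  have := pvRef_imp_head _ href
  rw [h _ (List.getElem_mem hi)] at this
  exact Bool.false_ne_true this

theorem pvRefOffs_shift (S : List (List String)) : ∀ m k,
    pvRefOffs (m + k) S = (pvRefOffs m S).map (· + k) := by
  induction S with
  | nil => intro m k; simp [pvRefOffs]
  | cons s ss ih =>
      intro m k
      unfold pvRefOffs
      rw [show m + k + s.length = m + s.length + k by omega, ih]
      split_ifs <;> simp

theorem pvRefPos_flat (S : List (List String)) (hwf : pvWfS S) :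
    pvRefPos S.flatten = pvRefOffs 0 S := by
  revert hwf
  induction S with
  | nil => intro _; simp [pvRefPos, pvRefOffs]
  | cons s ss ih =>
      intro hwf
      obtain ⟨h, t, hst, hh, ht⟩ := hwf s (by simp)
      have hwf' : pvWfS ss := fun x hx => hwf x (by simp [hx])
      subst hst
      rw [List.flatten_cons, pvRefPos_append, pvRefPos_cons, pvRefPos_nohead t ht, ih hwf']
      conv_rhs => rw [pvRefOffs]
      rw [pvRefOffs_shift ss 0 (h :: t).length]
      simp

theorem pvRefPos_decomp (P : List String) (S : List (List String))
    (hP : ∀ l ∈ P, pvIsHead l = false) (hwf : pvWfS S) :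
    pvRefPos (P ++ S.flatten) = pvRefOffs P.length S := by
  rw [pvRefPos_append, pvRefPos_nohead P hP, pvRefPos_flat S hwf]
  rw [← pvRefOffs_shift S 0 P.length]
  simp

theorem pvRefOffs_length (S : List (List String)) : ∀ m,
    (pvRefOffs m S).length = (S.filter (fun s => pvIsRef (s.headD ""))).length := by
  induction S with
  | nil => intro m; simp [pvRefOffs]
  | cons s ss ih =>
      intro m
      rw [pvRefOffs, List.filter_cons]
      split_ifs <;> simp [ih]

theorem pvDupOffs_true (S : List (List String)) : ∀ m, pvDupOffs m true S = pvRefOffs m S := by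
  induction S with
  | nil => intro m; simp [pvDupOffs, pvRefOffs]
  | cons s ss ih =>
      intro m
      by_cases hs : pvIsRef (s.head?.getD "")
      · rw [pvDupOffs, pvRefOffs]; simp [hs, ih]
      · rw [pvDupOffs, pvRefOffs]; simp [hs, ih]

theorem pvRefOffs_tail (S : List (List String)) : ∀ m,
    (pvRefOffs m S).tail = pvDupOffs m false S := by
  induction S with
  | nil => intro m; simp [pvDupOffs, pvRefOffs]
  | cons s ss ih =>
      intro m
      by_cases hs : pvIsRef (s.head?.getD "")
      · rw [pvDupOffs, pvRefOffs]; simp [hs, pvDupOffs_true]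
      · rw [pvDupOffs, pvRefOffs]; simp [hs, ih]

-- ---- findEnd ----
theorem pvFlatten_head (S : List (List String)) (hwf : pvWfS S) :
    S.flatten = [] ∨ pvIsHead (S.flatten.headD "") = true := by
  cases S with
  | nil => left; rfl
  | cons s ss =>
      obtain ⟨h, t, hst, hh, ht⟩ := hwf s (by simp)
      subst hst
      right
      simp [hh]

theorem pvGetD_mid (u t rest : List String) (h : String) (j : Nat) (hj : j < t.length) :
    (u ++ h :: (t ++ rest)).getD (u.length + 1 + j) "" = t[j] := by
  have hlen : u.length ≤ u.length + 1 + j := by omega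
  rw [List.getD_eq_getElem?_getD, List.getElem?_append_right hlen]
  have : u.length + 1 + j - u.length = j + 1 := by omega
  rw [this, List.getElem?_cons_succ, List.getElem?_append_left hj, List.getElem?_eq_getElem hj]
  rfl

theorem pvGetD_after (u t rest : List String) (h : String) :
    (u ++ h :: (t ++ rest)).getD (u.length + 1 + t.length) "" = rest.headD "" := by
  have hlen : u.length ≤ u.length + 1 + t.length := by omega
  rw [List.getD_eq_getElem?_getD, List.getElem?_append_right hlen]
  have : u.length + 1 + t.length - u.length = t.length + 1 := by omega
  rw [this, List.getElem?_cons_succ]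
  cases rest with
  | nil => simp
  | cons r rs =>
      rw [List.getElem?_append_right (le_refl t.length)]
      simp

theorem pvFindEnd_at (u t rest : List String) (h : String)
    (ht : ∀ l ∈ t, pvIsHead l = false)
    (hrest : rest = [] ∨ pvIsHead (rest.headD "") = true) :
    pvFindEnd (u ++ h :: (t ++ rest)) u.length = u.length + 1 + t.length := by
  unfold pvFindEnd
  have hlen : (u ++ h :: (t ++ rest)).length = u.length + 1 + (t.length + rest.length) := by
    simp; omega
  rw [hlen]
  have hc : u.length + 1 + (t.length + rest.length) - (u.length + 1) = t.length + rest.length := by omega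
  rw [hc]
  have hsplit : List.range' (u.length + 1) (t.length + rest.length)
      = List.range' (u.length + 1) t.length ++ List.range' (u.length + 1 + t.length) rest.length := by
    have h2 := @List.range'_append (u.length + 1) t.length rest.length 1
    rw [one_mul] at h2
    exact h2.symm
  rw [hsplit, List.find?_append]
  have h1 : (List.range' (u.length + 1) t.length).find?
      (fun i => pvIsHead ((u ++ h :: (t ++ rest)).getD i "")) = none := by
    rw [List.find?_eq_none]
    intro x hx
    rw [List.mem_range'_1] at hx
    have hj : x - (u.length + 1) < t.length := by omega
    have hxe : x = u.length + 1 + (x - (u.length + 1)) := by omega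
    rw [hxe, pvGetD_mid u t rest h _ hj]
    simp [ht _ (List.getElem_mem hj)]
  rw [h1]
  cases rest with
  | nil =>
      simp
  | cons r rs =>
      rw [List.length_cons, List.range'_succ, List.find?_cons]
      have : (u ++ h :: (t ++ r :: rs)).getD (u.length + 1 + t.length) "" = r := by
        rw [pvGetD_after]
        rfl
      rw [this]
      rcases hrest with hr | hr
      · exact absurd hr (by simp)
      · simp only [List.headD_cons] at hr
        simp [hr]

theorem pvMap_getD_range' (u t rest : List String) (h : String) :
    (List.range' (u.length + 1) t.length).map (fun i => (u ++ h :: (t ++ rest)).getD i "") = t := by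
  apply List.ext_getElem
  · simp
  · intro i h1 h2
    simp only [List.getElem_map, List.getElem_range']
    have hi : i < t.length := by simpa using h1
    rw [one_mul, pvGetD_mid u t rest h i hi]

-- ---- the collection loop ----
theorem pvFoldIdx (f : Nat → String) (idxs : List Nat) : ∀ (acc : List String),
    idxs.foldl (fun acc i => if PySem.Str.strip (f i) != "" then acc ++ [f i] else acc) acc
      = acc ++ ((idxs.map f).filter (fun l => PySem.Str.strip l != "")) := by
  induction idxs with
  | nil => intro acc; simp
  | cons i idxs ih =>
      intro acc
      rw [List.foldl_cons, List.map_cons, List.filter_cons]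
      by_cases hi : (PySem.Str.strip (f i) != "") = true
      · simp only [hi, if_pos]
        rw [ih]
        simp
      · simp only [hi, if_neg]
        rw [ih]
        simp [hi]

theorem pvOuterLoop (lines : List String) (S : List (List String)) :
    ∀ (u : List String) (seen : Bool) (acc : List String) (rem : List (Nat × Nat)),
    pvWfS S → lines = u ++ S.flatten →
    (pvDupOffs u.length seen S).foldl (pvCollectStep lines) (acc, rem)
      = (acc ++ pvExtraOf seen S, rem ++ pvRemOf u.length seen S) := by
  induction S with
  | nil => intro u seen acc rem _ _; simp [pvDupOffs, pvExtraOf, pvRemOf]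
  | cons s ss ih =>
      intro u seen acc rem hwf hl
      obtain ⟨h, t, hst, hh, ht⟩ := hwf s (by simp)
      have hwf' : pvWfS ss := fun x hx => hwf x (by simp [hx])
      subst hst
      have hlform : lines = u ++ h :: (t ++ ss.flatten) := by simpa using hl
      have hl' : lines = (u ++ (h :: t)) ++ ss.flatten := by
        rw [hlform]; simp
      have hlen' : (u ++ (h :: t)).length = u.length + (h :: t).length := by simp
      have hfe : pvFindEnd lines u.length = u.length + 1 + t.length := by
        rw [hlform]
        exact pvFindEnd_at u t ss.flatten h ht (pvFlatten_head ss hwf')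
      have hstep : ∀ (a : List String) (r : List (Nat × Nat)),
          pvCollectStep lines (a, r) u.length
            = (a ++ t.filter (fun l => PySem.Str.strip l != ""),
               r ++ [(u.length, u.length + 1 + t.length)]) := by
        intro a r
        simp only [pvCollectStep]
        rw [hfe]
        have h1 : u.length + 1 + t.length - (u.length + 1) = t.length := by omega
        rw [h1]
        have h2 := pvFoldIdx (fun i => lines.getD i "") (List.range' (u.length + 1) t.length) a
        simp only [h2]
        have h3 : (List.range' (u.length + 1) t.length).map (fun i => lines.getD i "") = t := by
          rw [hlform]
          exact pvMap_getD_range' u t ss.flatten h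
        rw [h3]
      have hlen2 : (u ++ (h :: t)).length = u.length + 1 + t.length := by simp; omega
      have hlen3 : u.length + (h :: t).length = u.length + 1 + t.length := by simp; omega
      rw [pvDupOffs, pvExtraOf, pvRemOf]
      by_cases hs : pvIsRef ((h :: t).headD "")
      · cases seen with
        | true =>
            simp only [hs, if_pos, if_true]
            rw [List.singleton_append, List.foldl_cons, hstep, hlen3]
            have hi := ih (u ++ (h :: t)) true
              (acc ++ t.filter (fun l => PySem.Str.strip l != ""))
              (rem ++ [(u.length, u.length + 1 + t.length)]) hwf' hl'
            rw [hlen2] at hi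
            rw [hi]
            simp
        | false =>
            have hi := ih (u ++ (h :: t)) true acc rem hwf' hl'
            rw [hlen2] at hi
            simp only [hs, if_pos, Bool.false_eq_true, if_false, List.nil_append]
            rw [hlen3]
            exact hi
      · simp only [hs, if_neg, Bool.false_eq_true, not_false_iff]
        have hi := ih (u ++ (h :: t)) seen acc rem hwf' hl'
        rw [hlen2] at hi
        rw [hlen3, hi]

-- ---- deletion ----
theorem pvCutLemma (u s X : List String) :
    pvDelRange (u ++ s ++ X) (u.length, u.length + s.length) = u ++ X := by
  unfold pvDelRange
  rw [List.append_assoc]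
  rw [List.take_left, ← List.append_assoc, List.drop_left' (by simp)]

theorem pvDelete (S : List (List String)) : ∀ (u : List String) (seen : Bool),
    pvWfS S →
    (pvRemOf u.length seen S).foldr (fun p nl => pvDelRange nl p) (u ++ S.flatten)
      = u ++ (pvKeepOf seen S).flatten := by
  induction S with
  | nil => intro u seen _; simp [pvRemOf, pvKeepOf]
  | cons s ss ih =>
      intro u seen hwf
      have hwf' : pvWfS ss := fun x hx => hwf x (by simp [hx])
      have hlen2 : (u ++ s).length = u.length + s.length := by simp
      have hflat : u ++ (s :: ss).flatten = (u ++ s) ++ ss.flatten := by simp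
      have hi := ih (u ++ s) true hwf'
      have hi' := ih (u ++ s) seen hwf'
      rw [hlen2] at hi hi'
      rw [pvRemOf, pvKeepOf, hflat]
      by_cases hs : pvIsRef (s.headD "")
      · cases seen with
        | true =>
            simp only [hs, if_pos, if_true, List.singleton_append, List.foldr_cons]
            rw [hi, pvCutLemma]
            simp
        | false =>
            simp only [hs, if_pos, Bool.false_eq_true, if_false, List.nil_append]
            rw [hi]
            simp
      · simp only [hs, if_neg, Bool.false_eq_true, not_false_iff]
        rw [hi']
        simp

theorem pvKeep_sub (S : List (List String)) : ∀ seen, ∀ s ∈ pvKeepOf seen S, s ∈ S := by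
  induction S with
  | nil => intro seen s hs; simp [pvKeepOf] at hs
  | cons x ss ih =>
      intro seen s hs
      rw [pvKeepOf] at hs
      by_cases hx : pvIsRef (x.headD "")
      · cases seen with
        | true =>
            simp only [hx, if_pos, if_true, List.nil_append] at hs
            exact List.mem_cons_of_mem _ (ih true s hs)
        | false =>
            simp only [hx, if_pos, Bool.false_eq_true, if_false, List.singleton_append] at hs
            rcases List.mem_cons.mp hs with rfl | hs
            · exact List.mem_cons_self ..
            · exact List.mem_cons_of_mem _ (ih true s hs)
      · simp only [hx, if_neg, Bool.false_eq_true, not_false_iff] at hs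
        rcases List.mem_cons.mp hs with rfl | hs
        · exact List.mem_cons_self ..
        · exact List.mem_cons_of_mem _ (ih seen s hs)

-- ---- the first Reference section ----
theorem pvFirstRef (S : List (List String)) (hwf : pvWfS S)
    (hne : S.filter (fun s => pvIsRef (s.headD "")) ≠ []) :
    ∃ B1 h t S2, S = B1 ++ (h :: t) :: S2 ∧
      (∀ s ∈ B1, pvIsRef (s.headD "") = false) ∧ pvIsRef h = true ∧
      (∀ l ∈ t, pvIsHead l = false) := by
  revert hwf hne
  induction S with
  | nil => intro _ hne; simp at hne
  | cons s ss ih =>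
      intro hwf hne
      obtain ⟨h, t, hst, hh, ht⟩ := hwf s (by simp)
      have hwf' : pvWfS ss := fun x hx => hwf x (by simp [hx])
      subst hst
      by_cases hs : pvIsRef ((h :: t).headD "")
      · refine ⟨[], h, t, ss, by simp, by simp, ?_, ht⟩
        simpa using hs
      · have hne' : ss.filter (fun s => pvIsRef (s.headD "")) ≠ [] := by
          intro hcon
          apply hne
          rw [List.filter_cons, hcon]
          have hs' : pvIsRef h = false := by simpa using hs
          simp [hs']
        obtain ⟨B1, h', t', S2, hSS, hB1, hh', ht'⟩ := ih hwf' hne'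
        refine ⟨(h :: t) :: B1, h', t', S2, by simp [hSS], ?_, hh', ht'⟩
        intro x hx
        rcases List.mem_cons.mp hx with rfl | hx
        · simpa using hs
        · exact hB1 x hx

theorem pvRefOffs_first (B1 : List (List String)) (h : String) (t : List String)
    (S2 : List (List String)) : ∀ m,
    (∀ s ∈ B1, pvIsRef (s.headD "") = false) → pvIsRef h = true →
    pvRefOffs m (B1 ++ (h :: t) :: S2)
      = (m + B1.flatten.length) :: pvRefOffs (m + B1.flatten.length + (t.length + 1)) S2 := by
  induction B1 with
  | nil =>
      intro m _ hh
      rw [List.nil_append, pvRefOffs]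
      simp [hh]
  | cons b B1 ih =>
      intro m hB1 hh
      have hb : pvIsRef (b.head?.getD "") = false := by simpa using hB1 b (by simp)
      rw [List.cons_append, pvRefOffs]
      rw [ih (m + b.length) (fun x hx => hB1 x (by simp [hx])) hh]
      simp [hb, Nat.add_assoc]

theorem pvExtraOf_first (B1 : List (List String)) (h : String) (t : List String)
    (S2 : List (List String))
    (hB1 : ∀ s ∈ B1, pvIsRef (s.headD "") = false) (hh : pvIsRef h = true) :
    pvExtraOf false (B1 ++ (h :: t) :: S2) = pvExtraOf true S2 := by
  induction B1 with
  | nil =>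
      rw [List.nil_append, pvExtraOf]
      simp [hh]
  | cons b B1 ih =>
      have hb : pvIsRef (b.head?.getD "") = false := by simpa using hB1 b (by simp)
      rw [List.cons_append, pvExtraOf]
      rw [ih (fun x hx => hB1 x (by simp [hx]))]
      simp [hb]

theorem pvKeepOf_first (B1 : List (List String)) (h : String) (t : List String)
    (S2 : List (List String))
    (hB1 : ∀ s ∈ B1, pvIsRef (s.headD "") = false) (hh : pvIsRef h = true) :
    pvKeepOf false (B1 ++ (h :: t) :: S2) = B1 ++ (h :: t) :: pvKeepOf true S2 := by
  induction B1 with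
  | nil =>
      rw [List.nil_append, pvKeepOf]
      simp [hh, pvBAcc]
  | cons b B1 ih =>
      have hb : pvIsRef (b.head?.getD "") = false := by simpa using hB1 b (by simp)
      rw [List.cons_append, pvKeepOf]
      rw [ih (fun x hx => hB1 x (by simp [hx]))]
      simp [hb]

theorem pvBAcc_first (extra : List String) (B1 : List (List String)) (h : String) (t : List String)
    (S2 : List (List String))
    (hB1 : ∀ s ∈ B1, pvIsRef (s.headD "") = false) (hh : pvIsRef h = true) :
    pvBAcc extra false (B1 ++ (h :: t) :: S2) = B1 ++ ((h :: t) ++ extra) :: pvBAcc extra true S2 := by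
  induction B1 with
  | nil =>
      rw [List.nil_append, pvBAcc]
      simp [hh]
  | cons b B1 ih =>
      have hb : pvIsRef (b.head?.getD "") = false := by simpa using hB1 b (by simp)
      rw [List.cons_append, pvBAcc]
      rw [ih (fun x hx => hB1 x (by simp [hx]))]
      simp [hb]

theorem pvBAcc_true_eq_keep (extra : List String) (S : List (List String)) :
    pvBAcc extra true S = pvKeepOf true S := by
  induction S with
  | nil => simp [pvBAcc, pvKeepOf]
  | cons s ss ih =>
      rw [pvBAcc, pvKeepOf, ih]
      simp

-- ---- extra = B's extra ----
theorem pvExtraOf_true (S : List (List String)) :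
    pvExtraOf true S = ((S.filter (fun s => pvIsRef (s.headD ""))).map
      (fun s => s.tail.filter (fun l => PySem.Str.strip l != ""))).flatten := by
  induction S with
  | nil => simp [pvExtraOf]
  | cons s ss ih =>
      rw [pvExtraOf, List.filter_cons, ih]
      by_cases hs : pvIsRef (s.head?.getD "")
      · simp [hs]
      · simp [hs]

-- ---- insertion ----
theorem pvInsertFold (ex : List String) : ∀ (k : Nat) (pre suf : List String) (n : Nat),
    pre.length = n + k →
    (ex.zipIdx k).foldl (pvInsertAt n) (pre ++ suf) = pre ++ ex ++ suf := by
  induction ex with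
  | nil => intro k pre suf n _; simp
  | cons x ex ih =>
      intro k pre suf n hlen
      rw [List.zipIdx_cons, List.foldl_cons]
      have h1 : pvInsertAt n (pre ++ suf) (x, k) = (pre ++ [x]) ++ suf := by
        unfold pvInsertAt
        rw [List.take_left' hlen, List.drop_left' hlen]
        simp
      rw [h1]
      rw [ih (k + 1) (pre ++ [x]) suf n (by simp [hlen]; omega)]
      simp

-- ---- B's fold ----
theorem pvBFold (extra : List String) (S : List (List String)) :
    ∀ (acc : List String) (seen : Bool),
    (S.foldl (pvMergeStep extra) (acc, seen)).1 = acc ++ (pvBAcc extra seen S).flatten := by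
  induction S with
  | nil => intro acc seen; simp [pvBAcc]
  | cons s ss ih =>
      intro acc seen
      rw [List.foldl_cons, pvBAcc]
      by_cases hs : pvIsRef (s.headD "")
      · cases seen with
        | true =>
            simp only [pvMergeStep, hs, if_pos, if_true]
            rw [ih]
            simp
        | false =>
            simp only [pvMergeStep, hs, if_pos, Bool.false_eq_true, if_false]
            rw [ih]
            simp
      · simp only [pvMergeStep, hs, if_neg, Bool.false_eq_true, not_false_iff]
        rw [ih]
        simp

-- ===== VERDICT (by name: the statement is the Claim_ definition above) =====
theorem merge_duplicate_reference_sections_py_spec : Claim_equal_merge_duplicate_reference_sections_py := by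
  unfold Claim_equal_merge_duplicate_reference_sections_py
  intro lines _
  unfold Spec_merge_duplicate_reference_sections_py
  have hflat := pvRSplit_flatten lines
  have hP := pvRSplit_pre lines
  have hwf := pvRSplit_wf lines
  have hrp : pvRefPos lines = pvRefOffs (pvRSplit lines).1.length (pvRSplit lines).2 := by
    conv_lhs => rw [← hflat]
    exact pvRefPos_decomp _ _ hP hwf
  have hlencnt : (pvRefPos lines).length
      = ((pvRSplit lines).2.filter (fun s => pvIsRef (s.headD ""))).length := by
    rw [hrp]; exact pvRefOffs_length _ _
  simp only [merge_duplicate_reference_sections_py, merge_duplicate_reference_sections_py_alt,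
    pvSplit_eq, hlencnt]
  by_cases hle : (((pvRSplit lines).2.filter (fun s => pvIsRef (s.headD ""))).length ≤ 1)
  · rw [if_pos hle, if_pos hle]
  · rw [if_neg hle, if_neg hle]
    have hne : (pvRSplit lines).2.filter (fun s => pvIsRef (s.headD "")) ≠ [] := by
      intro hcon
      rw [hcon] at hle
      simp at hle
    obtain ⟨B1, h, t, S2, hS, hB1, hh, ht⟩ := pvFirstRef _ hwf hne
    have hhd : pvIsRef ((h :: t).headD "") = true := by simpa using hh
    have hfilter : (pvRSplit lines).2.filter (fun s => pvIsRef (s.headD ""))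
        = (h :: t) :: S2.filter (fun s => pvIsRef (s.headD "")) := by
      rw [hS, List.filter_append]
      rw [List.filter_eq_nil_iff.mpr (by intro x hx; simpa using hB1 x hx)]
      rw [List.nil_append, List.filter_cons, if_pos hhd]
    -- A's ref positions
    have hoffs := pvRefOffs_first B1 h t S2 (pvRSplit lines).1.length hB1 hh
    rw [← hS] at hoffs
    have htail := pvRefOffs_tail (pvRSplit lines).2 (pvRSplit lines).1.length
    -- the collection loop
    have hloop := pvOuterLoop lines (pvRSplit lines).2 (pvRSplit lines).1 false [] [] hwf hflat.symm
    -- deletion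
    have hdel : (pvRemOf (pvRSplit lines).1.length false (pvRSplit lines).2).reverse.foldl
        pvDelRange lines = (pvRSplit lines).1 ++ (pvKeepOf false (pvRSplit lines).2).flatten := by
      have hd := pvDelete (pvRSplit lines).2 (pvRSplit lines).1 false hwf
      rw [hflat] at hd
      rw [List.foldl_reverse]
      exact hd
    -- extras agree
    have hextra : pvExtraOf false (pvRSplit lines).2 = pvExtraOf true S2 := by
      rw [hS]; exact pvExtraOf_first B1 h t S2 hB1 hh
    have hbextra : ((S2.filter (fun s => pvIsRef (s.headD ""))).map
        (fun s => s.tail.filter (fun l => PySem.Str.strip l != ""))).flatten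
          = pvExtraOf false (pvRSplit lines).2 := by
      rw [hextra, pvExtraOf_true]
    -- keep decomposition
    have hkeep : pvKeepOf false (pvRSplit lines).2 = B1 ++ (h :: t) :: pvKeepOf true S2 := by
      rw [hS]; exact pvKeepOf_first B1 h t S2 hB1 hh
    have hwfk : pvWfS (pvKeepOf true S2) := by
      intro x hx
      apply hwf
      rw [hS]
      have : x ∈ S2 := pvKeep_sub S2 true x hx
      simp [this]
    -- the new first-section end
    have hnfe : pvFindEnd ((pvRSplit lines).1 ++ (pvKeepOf false (pvRSplit lines).2).flatten)
        ((pvRSplit lines).1.length + B1.flatten.length)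
          = (pvRSplit lines).1.length + B1.flatten.length + 1 + t.length := by
      rw [hkeep]
      have harr : (pvRSplit lines).1 ++ (B1 ++ (h :: t) :: pvKeepOf true S2).flatten
          = ((pvRSplit lines).1 ++ B1.flatten) ++ h :: (t ++ (pvKeepOf true S2).flatten) := by
        simp
      rw [harr]
      have hlen : ((pvRSplit lines).1 ++ B1.flatten).length
          = (pvRSplit lines).1.length + B1.flatten.length := by simp
      rw [← hlen]
      exact pvFindEnd_at _ t _ h ht (pvFlatten_head _ hwfk)
    -- now reduce both sides
    rw [hfilter, hrp, htail, hoffs]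
    simp only [List.tail_cons, List.headD_cons]
    rw [hloop, List.nil_append, List.nil_append, hdel, hbextra]
    rw [pvBFold]
    have hbacc : ∀ ex, pvBAcc ex false (pvRSplit lines).2
        = B1 ++ ((h :: t) ++ ex) :: pvKeepOf true S2 := by
      intro ex
      rw [hS, pvBAcc_first ex B1 h t S2 hB1 hh, pvBAcc_true_eq_keep]
    rw [hbacc]
    by_cases hemp : (pvExtraOf false (pvRSplit lines).2).isEmpty
    · rw [if_pos hemp]
      have : pvExtraOf false (pvRSplit lines).2 = [] := by simpa [List.isEmpty_iff] using hemp
      rw [this, hkeep]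
      simp
    · rw [if_neg hemp]
      rw [hnfe, hkeep]
      have harr2 : (pvRSplit lines).1 ++ (B1 ++ (h :: t) :: pvKeepOf true S2).flatten
          = (((pvRSplit lines).1 ++ B1.flatten) ++ h :: t) ++ (pvKeepOf true S2).flatten := by
        simp
      rw [harr2]
      rw [pvInsertFold (pvExtraOf false (pvRSplit lines).2) 0
        (((pvRSplit lines).1 ++ B1.flatten) ++ h :: t) ((pvKeepOf true S2).flatten)
        ((pvRSplit lines).1.length + B1.flatten.length + 1 + t.length) (by simp; omega)]
      simp
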